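-- pv_equiv track=rewrite | github.com/csw1511/algorithm_study | Python codingtest bookstudy/11 DFS BFS practice/4 bracket conversion.py | slicebracket
-- ===== SOURCE A (Python) =====
-- def slicebracket(w):
--     if w ==[]:
--         return w, w
--     wlist = []
--
--     for i in w:
--         wlist.append(i)
--
--     count = 0
--     u = []
--     v = []
--     u.append(wlist[0])
--     if wlist[0] == '(':
--         count +=1
--     elif wlist[0] == ')':
--         count -=1
--     del wlist[0]
--
--     while count != 0:
--         u.append(wlist[0])
--         if wlist[0] == '(':
--             count +=1
--         elif wlist[0] == ')':
--             count -=1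
--         del wlist[0]
--
--     for i in wlist:
--         v.append(i)
--     return u, v
-- ===== SOURCE B (Python) =====
-- def slicebracket(w):
--     if w == []:
--         return w, w
--     count = 0
--     for i, ch in enumerate(w):
--         if ch == '(':
--             count += 1
--         elif ch == ')':
--             count -= 1
--         if count == 0:
--             return w[:i+1], w[i+1:]
--     return w, []
-- ===== Notes on version B (the rewrite author's own statement) =====
-- stated objective: alternative
-- what changed: A copies the list and moves elements one by one into u via repeated del wlist[0] (quadratic in the split index), then copies the remainder into v; B does a single indexed scan of the running bracket balance and returns two slices at the first zero point.
import Mathlib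
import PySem

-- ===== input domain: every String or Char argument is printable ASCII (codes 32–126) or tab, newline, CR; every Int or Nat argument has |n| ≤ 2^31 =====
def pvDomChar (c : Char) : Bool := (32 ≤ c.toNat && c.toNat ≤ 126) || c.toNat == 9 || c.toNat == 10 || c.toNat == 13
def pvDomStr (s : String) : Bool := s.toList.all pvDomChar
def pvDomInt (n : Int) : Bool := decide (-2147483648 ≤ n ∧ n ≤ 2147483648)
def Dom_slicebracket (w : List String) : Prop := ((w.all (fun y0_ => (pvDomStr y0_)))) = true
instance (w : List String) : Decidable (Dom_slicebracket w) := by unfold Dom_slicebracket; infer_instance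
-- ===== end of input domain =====

-- B replaces A's element-by-element move (del wlist[0]) with one indexed balance scan
-- and two slices (alternative structure); ports agree on all inputs where the Python A returns.

-- ===== PORT A =====
-- A's while loop: u takes elements from the front of wlist until the balance count is 0.
-- Where Python raises IndexError (wlist exhausted with count ≠ 0) the port returns ([], []); outside Pre_.
def slicebracketLoop (count : Int) (u wlist : List String) : List String × List String :=
  if count = 0 then (u, wlist)
  else
    match wlist with
    | [] => ([], [])
    | x :: rest =>
        slicebracketLoop (if x = "(" then count + 1 else if x = ")" then count - 1 else count)
          (u ++ [x]) rest

def slicebracket (w : List String) : List String × List String :=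
  match w with
  | [] => ([], [])
  | x :: rest =>
      let count : Int := if x = "(" then 1 else if x = ")" then -1 else 0
      slicebracketLoop count [x] rest

-- ===== PORT B =====
-- B: enumerate-scan of the running balance; at the first zero, return the two slices.
def slicebracketAltLoop (w : List String) (pairs : List (Int × String)) (count : Int) :
    List String × List String :=
  match pairs with
  | [] => (w, [])
  | (i, ch) :: rest =>
      let count := if ch = "(" then count + 1 else if ch = ")" then count - 1 else count
      if count = 0 then
        (PySem.List.slice w none (some (i + 1)), PySem.List.slice w (some (i + 1)) none)
      else slicebracketAltLoop w rest count

def slicebracket_alt (w : List String) : List String × List String :=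
  if w = [] then (w, w)
  else slicebracketAltLoop w (PySem.List.enumerate w 0) 0

-- ===== PRECONDITION & SPEC =====
-- Running balance of a prefix: +1 for "(", -1 for ")", 0 otherwise.
def pvBal (xs : List String) : Int :=
  xs.foldl (fun c s => if s = "(" then c + 1 else if s = ")" then c - 1 else c) 0

-- Pre_ excludes exactly the inputs on which the Python A raises IndexError:
-- non-empty lists with no positive-length prefix of balance zero.
def Pre_slicebracket (w : List String) : Prop :=
  w = [] ∨ ∃ j < w.length, pvBal (w.take (j + 1)) = 0
instance (w : List String) : Decidable (Pre_slicebracket w) := by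
  unfold Pre_slicebracket; infer_instance

def pvWitness_slicebracket : List String := ["(", "x", ")", ")"]

def Spec_slicebracket (w : List String) (out : List String × List String) : Prop :=
  out = slicebracket_alt w
instance (w : List String) (out : List String × List String) : Decidable (Spec_slicebracket w out) := by
  unfold Spec_slicebracket; infer_instance

-- ===== CLAIM (what is proved, stated in full; the proofs are below) =====
def Claim_equal_slicebracket : Prop :=
  ∀ (w : List String), Dom_slicebracket w → Pre_slicebracket w →
    Spec_slicebracket w (slicebracket w)

-- ===== LEMMAS AND PROOFS =====

lemma pvBal_take_succ (w : List String) (i : Nat) (h : i < w.length) :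
    pvBal (w.take (i + 1)) =
      (if w[i] = "(" then pvBal (w.take i) + 1
       else if w[i] = ")" then pvBal (w.take i) - 1 else pvBal (w.take i)) := by
  have h2 : w.take (i + 1) = w.take i ++ [w[i]] := by
    rw [List.take_add_one]
    simp [List.getElem?_eq_getElem h]
  rw [h2]
  unfold pvBal
  rw [List.foldl_append]
  simp

lemma loop_eq (n : Nat) : ∀ (w : List String) (i : Nat), 0 < i → i ≤ w.length →
    w.length - i = n →
    (∃ j < w.length, pvBal (w.take (j + 1)) = 0) →
    (∀ k, 0 < k → k ≤ i → pvBal (w.take k) ≠ 0) →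
    slicebracketLoop (pvBal (w.take i)) (w.take i) (w.drop i) =
      slicebracketAltLoop w (PySem.List.enumerate (w.drop i) (i : Int)) (pvBal (w.take i)) := by
  induction n with
  | zero =>
      intro w i hi0 hile hn hPre hH
      have hlen : i = w.length := by omega
      obtain ⟨j, hj, hbal⟩ := hPre
      exact absurd hbal (hH (j + 1) (by omega) (by omega))
  | succ n ih =>
      intro w i hi0 hile hn hPre hH
      have hi : i < w.length := by omega
      have hdrop : w.drop i = w[i] :: w.drop (i + 1) := List.drop_eq_getElem_cons hi
      have hc : pvBal (w.take i) ≠ 0 := hH i hi0 le_rfl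
      have hstep : pvBal (w.take (i + 1)) =
          (if w[i] = "(" then pvBal (w.take i) + 1
           else if w[i] = ")" then pvBal (w.take i) - 1 else pvBal (w.take i)) :=
        pvBal_take_succ w i hi
      have htake : w.take i ++ [w[i]] = w.take (i + 1) := by
        rw [List.take_add_one]; simp [List.getElem?_eq_getElem hi]
      rw [hdrop]
      rw [slicebracketLoop.eq_def, if_neg hc]
      rw [PySem.List.enumerate_cons, slicebracketAltLoop]
      simp only [htake, ← hstep]
      by_cases hz : pvBal (w.take (i + 1)) = 0
      · rw [if_pos hz, slicebracketLoop.eq_def, if_pos hz]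
        have h1 : (i : Int) + 1 = ((i + 1 : Nat) : Int) := by push_cast; ring
        rw [h1, PySem.List.slice_to_natCast, PySem.List.slice_from_natCast]
      · rw [if_neg hz]
        have h1 : (i : Int) + 1 = ((i + 1 : Nat) : Int) := by push_cast; ring
        rw [h1]
        exact ih w (i + 1) (by omega) (by omega) (by omega) hPre
          (by intro k hk0 hk1
              rcases Nat.lt_or_ge k (i + 1) with h | h
              · exact hH k hk0 (by omega)
              · have : k = i + 1 := by omega
                simpa [this] using hz)

-- ===== VERDICT (by name: the statement is the Claim_ definition above) =====
theorem slicebracket_spec : Claim_equal_slicebracket := by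
  intro w _ hPre
  unfold Spec_slicebracket
  match w with
  | [] => rfl
  | x :: rest =>
      have hne : (x :: rest : List String) ≠ [] := by simp
      have hPre' : ∃ j < (x :: rest).length, pvBal ((x :: rest).take (j + 1)) = 0 := by
        rcases hPre with h | h
        · exact absurd h hne
        · exact h
      rw [slicebracket, slicebracket_alt, if_neg hne]
      have henum : PySem.List.enumerate (x :: rest) (0 : Int) =
          (0, x) :: PySem.List.enumerate rest (0 + 1) := PySem.List.enumerate_cons _ _ _
      rw [henum, slicebracketAltLoop]
      have hbal1 : pvBal ((x :: rest).take 1) =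
          (if x = "(" then (1 : Int) else if x = ")" then -1 else 0) := by
        simp [pvBal]
      by_cases hz : (if x = "(" then (1 : Int) else if x = ")" then -1 else 0) = 0
      · simp only [show (if x = "(" then (0 : Int) + 1 else if x = ")" then (0 : Int) - 1 else 0)
            = (if x = "(" then (1 : Int) else if x = ")" then -1 else 0) by split_ifs <;> ring]
        rw [if_pos hz, slicebracketLoop.eq_def, if_pos hz]
        have h01 : ((0 : Int) + 1) = ((1 : Nat) : Int) := by norm_num
        rw [h01, PySem.List.slice_to_natCast, PySem.List.slice_from_natCast]
        simp
      · simp only [show (if x = "(" then (0 : Int) + 1 else if x = ")" then (0 : Int) - 1 else 0)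
            = (if x = "(" then (1 : Int) else if x = ")" then -1 else 0) by split_ifs <;> ring]
        rw [if_neg hz]
        have := loop_eq ((x :: rest).length - 1) (x :: rest) 1 (by omega) (by simp) rfl hPre'
          (by intro k hk0 hk1
              have : k = 1 := by omega
              rw [this, hbal1]
              exact hz)
        rw [hbal1] at this
        simpa using this
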